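-- pv_equiv track=rewrite | github.com/3saster/advent-of-code-2025 | Day 05/Solution.py | Part2
-- ===== SOURCE A (Python) =====
-- def Part2(ranges):
--     L = len(ranges)
--     for i in range( L ):
--         j = 0
--         while j < L:
--             if i==j:
--                 j += 1
--                 continue
--             reset = False
--             if ranges[j][0] <= ranges[i][0] <= ranges[j][1]:
--                 ranges[i][0] = ranges[j][1] + 1
--                 reset = True
--             if ranges[j][0] <= ranges[i][1] <= ranges[j][1]:
--                 ranges[i][1] = ranges[j][0] - 1
--                 reset = True
--             j += 1
--             if reset:
--                 j = 0
--
--     valids = 0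
--     for bot,top in ranges:
--         if (r:=top-bot+1) > 0:
--             valids += r
--     return valids
-- ===== SOURCE B (Python) =====
-- def Part2(ranges):
--     L = len(ranges)
--     for i in range(L):
--         bot, top = ranges[i][0], ranges[i][1]
--         others = ranges[:i] + ranges[i+1:]
--         for s, e in sorted(others, key=lambda r: r[0]):
--             if s <= bot <= e:
--                 bot = e + 1
--         for s, e in sorted(others, key=lambda r: r[1], reverse=True):
--             if s <= top <= e:
--                 top = s - 1
--         ranges[i][0], ranges[i][1] = bot, top
--     return sum(max(top - bot + 1, 0) for bot, top in ranges)
-- ===== Notes on version B (the rewrite author's own statement) =====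
-- stated objective: faster
-- what changed: A's inner while-loop rescans all other ranges from j=0 after every clip; B instead, for each i, sorts the other ranges once by start (and once by end, descending) and escapes each endpoint in a single sweep over the sorted list, reaching the same fixpoint (the nearest uncovered point).
import Mathlib
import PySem

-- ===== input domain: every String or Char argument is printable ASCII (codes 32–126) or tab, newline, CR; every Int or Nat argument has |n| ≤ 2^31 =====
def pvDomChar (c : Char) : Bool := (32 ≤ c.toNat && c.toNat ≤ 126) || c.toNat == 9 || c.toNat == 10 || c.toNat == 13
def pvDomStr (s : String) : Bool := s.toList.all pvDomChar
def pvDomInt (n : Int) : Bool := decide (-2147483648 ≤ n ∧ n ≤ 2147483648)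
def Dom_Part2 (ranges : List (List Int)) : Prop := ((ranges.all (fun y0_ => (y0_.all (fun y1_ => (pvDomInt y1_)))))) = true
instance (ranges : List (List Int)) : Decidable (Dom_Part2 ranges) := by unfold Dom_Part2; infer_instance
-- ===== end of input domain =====

-- B replaces A's rescan-from-j=0 reset loop by, per index i, one sorted sweep per endpoint
-- (sort others by start / by end descending, escape the endpoint in one pass); objective: faster.
-- Both A and B mutate `ranges` in place identically; the theorems are about the return value.

-- ===== PORT A =====
-- row accessors: under Pre_Part2 every row has length 2, so getD never hits its default
def pvS (rs : List (List Int)) (k : Nat) : Int := (rs.getD k []).getD 0 0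
def pvE (rs : List (List Int)) (k : Nat) : Int := (rs.getD k []).getD 1 0

-- termination measure helpers for A's while-loop (number of possible future landing spots)
def cntB (rs : List (List Int)) (i : Nat) (b : Int) : Nat :=
  ((Finset.range rs.length).filter (fun k => k ≠ i ∧ b ≤ pvE rs k)).card
def cntT (rs : List (List Int)) (i : Nat) (t : Int) : Nat :=
  ((Finset.range rs.length).filter (fun k => k ≠ i ∧ pvS rs k ≤ t)).card

theorem cntB_lt (rs : List (List Int)) (i j : Nat) (b : Int) (hj : j < rs.length)
    (hji : j ≠ i) (h2 : b ≤ pvE rs j) :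
    cntB rs i (pvE rs j + 1) < cntB rs i b := by
  apply Finset.card_lt_card
  constructor
  · intro k hk
    simp only [Finset.mem_filter, Finset.mem_range] at *
    exact ⟨hk.1, hk.2.1, by omega⟩
  · intro hsub
    have hj' := hsub (by simp only [Finset.mem_filter, Finset.mem_range]; exact ⟨hj, hji, h2⟩)
    simp only [Finset.mem_filter, Finset.mem_range] at hj'
    omega

theorem cntT_lt (rs : List (List Int)) (i j : Nat) (t : Int) (hj : j < rs.length)
    (hji : j ≠ i) (h1 : pvS rs j ≤ t) :
    cntT rs i (pvS rs j - 1) < cntT rs i t := by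
  apply Finset.card_lt_card
  constructor
  · intro k hk
    simp only [Finset.mem_filter, Finset.mem_range] at *
    exact ⟨hk.1, hk.2.1, by omega⟩
  · intro hsub
    have hj' := hsub (by simp only [Finset.mem_filter, Finset.mem_range]; exact ⟨hj, hji, h1⟩)
    simp only [Finset.mem_filter, Finset.mem_range] at hj'
    omega

-- A's inner `while j < L` loop with the `reset`/`j = 0` restart; ranges[i] is carried as (b, t)
def escA (rs : List (List Int)) (i : Nat) (b t : Int) (j : Nat) : Int × Int :=
  if _h : j < rs.length then
    if _hj : j = i then escA rs i b t (j+1)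
    else if _hc : (pvS rs j ≤ b ∧ b ≤ pvE rs j) ∨ (pvS rs j ≤ t ∧ t ≤ pvE rs j) then
      escA rs i (if pvS rs j ≤ b ∧ b ≤ pvE rs j then pvE rs j + 1 else b)
                (if pvS rs j ≤ t ∧ t ≤ pvE rs j then pvS rs j - 1 else t) 0
    else escA rs i b t (j+1)
  else (b, t)
termination_by (cntB rs i b + cntT rs i t) * (rs.length + 1) + (rs.length - j)
decreasing_by
  · omega
  · have hlt : cntB rs i (if pvS rs j ≤ b ∧ b ≤ pvE rs j then pvE rs j + 1 else b)
        + cntT rs i (if pvS rs j ≤ t ∧ t ≤ pvE rs j then pvS rs j - 1 else t)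
        < cntB rs i b + cntT rs i t := by
      rcases _hc with h | h
      · have h1 := cntB_lt rs i j b _h _hj h.2
        rw [if_pos h]
        split_ifs with h'
        · have h2 := cntT_lt rs i j t _h _hj h'.1
          omega
        · omega
      · have h2 := cntT_lt rs i j t _h _hj h.1
        rw [if_pos h]
        split_ifs with h'
        · have h1 := cntB_lt rs i j b _h _hj h'.2
          omega
        · omega
    calc (cntB rs i (if pvS rs j ≤ b ∧ b ≤ pvE rs j then pvE rs j + 1 else b)
            + cntT rs i (if pvS rs j ≤ t ∧ t ≤ pvE rs j then pvS rs j - 1 else t)) * (rs.length + 1)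
            + (rs.length - 0)
        < (cntB rs i (if pvS rs j ≤ b ∧ b ≤ pvE rs j then pvE rs j + 1 else b)
            + cntT rs i (if pvS rs j ≤ t ∧ t ≤ pvE rs j then pvS rs j - 1 else t) + 1) * (rs.length + 1) := by
          ring_nf; omega
      _ ≤ (cntB rs i b + cntT rs i t) * (rs.length + 1) := by
          exact Nat.mul_le_mul_right _ (by omega)
      _ ≤ (cntB rs i b + cntT rs i t) * (rs.length + 1) + (rs.length - j) := by omega
  · omega

-- `for i in range(L)` with the in-place write-back of ranges[i]
def outerA (rs : List (List Int)) (i L : Nat) : List (List Int) :=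
  if _h : i < L then
    let bt := escA rs i (pvS rs i) (pvE rs i) 0
    outerA (rs.set i [bt.1, bt.2]) (i+1) L
  else rs
termination_by L - i

-- `for bot,top in ranges: if (r:=top-bot+1)>0: valids += r`
def sumA (rs : List (List Int)) : Int :=
  rs.foldl (fun acc r =>
    if r.getD 1 0 - r.getD 0 0 + 1 > 0 then acc + (r.getD 1 0 - r.getD 0 0 + 1) else acc) 0

def Part2 (ranges : List (List Int)) : Int := sumA (outerA ranges 0 ranges.length)

-- ===== PORT B =====
-- one pass over the others sorted by start: escape bot upward
def sweepUp (l : List (List Int)) (b : Int) : Int :=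
  l.foldl (fun b r => if r.getD 0 0 ≤ b ∧ b ≤ r.getD 1 0 then r.getD 1 0 + 1 else b) b

-- one pass over the others sorted by end descending: escape top downward
def sweepDown (l : List (List Int)) (t : Int) : Int :=
  l.foldl (fun t r => if r.getD 0 0 ≤ t ∧ t ≤ r.getD 1 0 then r.getD 0 0 - 1 else t) t

def outerB (rs : List (List Int)) (i L : Nat) : List (List Int) :=
  if _h : i < L then
    let others := rs.take i ++ rs.drop (i+1)
    let bot := sweepUp (PySem.List.sorted others (fun r => r.getD 0 0) false) ((rs.getD i []).getD 0 0)
    let top := sweepDown (PySem.List.sorted others (fun r => r.getD 1 0) true) ((rs.getD i []).getD 1 0)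
    outerB (rs.set i [bot, top]) (i+1) L
  else rs
termination_by L - i

def Part2_alt (ranges : List (List Int)) : Int :=
  (outerB ranges 0 ranges.length).foldl (fun acc r => acc + max (r.getD 1 0 - r.getD 0 0 + 1) 0) 0

-- ===== PRECONDITION & SPEC =====
-- Pre_ excludes exactly the inputs where Python A raises: a row of length ≠ 2 makes A hit an
-- IndexError (indexing [0]/[1]) or a ValueError (unpacking `for bot,top in ranges`).
def Pre_Part2 (ranges : List (List Int)) : Prop := ∀ r ∈ ranges, r.length = 2
instance (ranges : List (List Int)) : Decidable (Pre_Part2 ranges) := by unfold Pre_Part2; infer_instance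

def pvWitness_Part2 : List (List Int) := [[0, 5], [3, 9], [11, 11]]

def Spec_Part2 (ranges : List (List Int)) (out : Int) : Prop := out = Part2_alt ranges
instance (ranges : List (List Int)) (out : Int) : Decidable (Spec_Part2 ranges out) := by unfold Spec_Part2; infer_instance

-- ===== CLAIM (what is proved, stated in full; the proofs are below) =====
def Claim_equal_Part2 : Prop := ∀ (ranges : List (List Int)), Dom_Part2 ranges → Pre_Part2 ranges → Spec_Part2 ranges (Part2 ranges)

-- ===== LEMMAS AND PROOFS =====

-- coverage of a point by the intervals at indices ≠ i / by a list of intervals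
def covK (rs : List (List Int)) (k : Nat) (x : Int) : Prop := pvS rs k ≤ x ∧ x ≤ pvE rs k
def covIdx (rs : List (List Int)) (i : Nat) (x : Int) : Prop := ∃ k, k < rs.length ∧ k ≠ i ∧ covK rs k x
def covL (l : List (List Int)) (x : Int) : Prop := ∃ r ∈ l, r.getD 0 0 ≤ x ∧ x ≤ r.getD 1 0

-- b is the least point ≥ b0 not covered by C / t the greatest point ≤ t0 not covered
def MinEsc (C : Int → Prop) (b0 b : Int) : Prop := b0 ≤ b ∧ ¬ C b ∧ ∀ x, b0 ≤ x → x < b → C x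
def MaxEsc (C : Int → Prop) (t0 t : Int) : Prop := t ≤ t0 ∧ ¬ C t ∧ ∀ x, x ≤ t0 → t < x → C x

theorem MinEsc_unique {C : Int → Prop} {b0 b b' : Int}
    (h : MinEsc C b0 b) (h' : MinEsc C b0 b') : b = b' := by
  rcases h with ⟨h1, h2, h3⟩
  rcases h' with ⟨h1', h2', h3'⟩
  by_contra hne
  rcases lt_or_gt_of_ne hne with hlt | hlt
  · exact h2 (h3' b h1 hlt)
  · exact h2' (h3 b' h1' hlt)

theorem MaxEsc_unique {C : Int → Prop} {t0 t t' : Int}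
    (h : MaxEsc C t0 t) (h' : MaxEsc C t0 t') : t = t' := by
  rcases h with ⟨h1, h2, h3⟩
  rcases h' with ⟨h1', h2', h3'⟩
  by_contra hne
  rcases lt_or_gt_of_ne hne with hlt | hlt
  · exact h2' (h3 t' h1' hlt)
  · exact h2 (h3' t h1 hlt)

theorem MinEsc_congr {C C' : Int → Prop} (h : ∀ x, C x ↔ C' x) {b0 b : Int}
    (hm : MinEsc C b0 b) : MinEsc C' b0 b :=
  ⟨hm.1, fun hc => hm.2.1 ((h b).mpr hc), fun x hx1 hx2 => (h x).mp (hm.2.2 x hx1 hx2)⟩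

theorem MaxEsc_congr {C C' : Int → Prop} (h : ∀ x, C x ↔ C' x) {t0 t : Int}
    (hm : MaxEsc C t0 t) : MaxEsc C' t0 t :=
  ⟨hm.1, fun hc => hm.2.1 ((h t).mpr hc), fun x hx1 hx2 => (h x).mp (hm.2.2 x hx1 hx2)⟩

-- ===== A-side: the reset loop computes the two escapes =====
theorem escA_spec (rs : List (List Int)) (i : Nat) (b t : Int) (j : Nat) :
    ∀ b0 t0 : Int, b0 ≤ b → t ≤ t0 →
    (∀ x, b0 ≤ x → x < b → covIdx rs i x) →
    (∀ x, x ≤ t0 → t < x → covIdx rs i x) →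
    (∀ k, k < j → k ≠ i → ¬ covK rs k b ∧ ¬ covK rs k t) →
    MinEsc (covIdx rs i) b0 (escA rs i b t j).1 ∧ MaxEsc (covIdx rs i) t0 (escA rs i b t j).2 := by
  induction b, t, j using escA.induct rs i with
  | case1 b t h IH =>
    intro b0 t0 hb ht hcb hct hpre
    rw [escA, dif_pos h, dif_pos rfl]
    apply IH b0 t0 hb ht hcb hct
    intro k hk hki
    exact hpre k (by omega) hki
  | case2 b t j hlt hji hc IH =>
    intro b0 t0 hb ht hcb hct hpre
    simp only [dite_eq_ite] at IH
    rw [escA, dif_pos hlt, dif_neg hji, dif_pos hc]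
    apply IH b0 t0
    · split_ifs with h1
      · omega
      · exact hb
    · split_ifs with h2
      · omega
      · exact ht
    · intro x hx1 hx2
      split_ifs at hx2 with h1
      · rcases lt_or_ge x b with hxb | hxb
        · exact hcb x hx1 hxb
        · exact ⟨j, hlt, hji, by unfold covK; omega⟩
      · exact hcb x hx1 hx2
    · intro x hx1 hx2
      split_ifs at hx2 with h2
      · rcases lt_or_ge t x with htx | htx
        · exact hct x hx1 htx
        · exact ⟨j, hlt, hji, by unfold covK; omega⟩
      · exact hct x hx1 hx2
    · intro k hk; omega
  | case3 b t j hlt hji hc IH =>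
    intro b0 t0 hb ht hcb hct hpre
    rw [escA, dif_pos hlt, dif_neg hji, dif_neg hc]
    apply IH b0 t0 hb ht hcb hct
    intro k hk hki
    rcases Nat.lt_or_ge k j with hk' | hk'
    · exact hpre k hk' hki
    · have hkj : k = j := by omega
      subst hkj
      push Not at hc
      unfold covK
      constructor
      · intro hcov; have := hc.1 hcov.1; omega
      · intro hcov; have := hc.2 hcov.1; omega
  | case4 b t j h =>
    intro b0 t0 hb ht hcb hct hpre
    rw [escA, dif_neg h]
    refine ⟨⟨hb, ?_, hcb⟩, ⟨ht, ?_, hct⟩⟩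
    · rintro ⟨k, hk, hki, hcov⟩
      exact (hpre k (by omega) hki).1 hcov
    · rintro ⟨k, hk, hki, hcov⟩
      exact (hpre k (by omega) hki).2 hcov

-- ===== B-side: each sorted sweep computes its escape =====
theorem sweepUp_nil (b : Int) : sweepUp [] b = b := rfl
theorem sweepUp_cons (r : List Int) (l : List (List Int)) (b : Int) :
    sweepUp (r :: l) b = sweepUp l (if r.getD 0 0 ≤ b ∧ b ≤ r.getD 1 0 then r.getD 1 0 + 1 else b) := rfl
theorem sweepDown_nil (t : Int) : sweepDown [] t = t := rfl
theorem sweepDown_cons (r : List Int) (l : List (List Int)) (t : Int) :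
    sweepDown (r :: l) t = sweepDown l (if r.getD 0 0 ≤ t ∧ t ≤ r.getD 1 0 then r.getD 0 0 - 1 else t) := rfl

theorem sweepUp_id (l : List (List Int)) (b : Int) (h : ∀ r ∈ l, b < r.getD 0 0) :
    sweepUp l b = b := by
  induction l with
  | nil => rfl
  | cons r l ih =>
    rw [sweepUp_cons, if_neg (by have := h r (by simp); omega)]
    exact ih (fun r' hr' => h r' (by simp [hr']))

theorem sweepDown_id (l : List (List Int)) (t : Int) (h : ∀ r ∈ l, r.getD 1 0 < t) :
    sweepDown l t = t := by
  induction l with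
  | nil => rfl
  | cons r l ih =>
    rw [sweepDown_cons, if_neg (by have := h r (by simp); omega)]
    exact ih (fun r' hr' => h r' (by simp [hr']))

theorem sweepUp_spec (l : List (List Int)) (b0 : Int)
    (hp : l.Pairwise (fun r r' => r.getD 0 0 ≤ r'.getD 0 0)) :
    MinEsc (covL l) b0 (sweepUp l b0) := by
  induction l generalizing b0 with
  | nil =>
    rw [sweepUp_nil]
    exact ⟨le_refl _, by rintro ⟨r, hr, _⟩; simp at hr, fun x hx1 hx2 => absurd hx2 (by omega)⟩
  | cons r l ih =>
    rcases List.pairwise_cons.mp hp with ⟨hhead, htail⟩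
    rw [sweepUp_cons]
    by_cases hc : r.getD 0 0 ≤ b0 ∧ b0 ≤ r.getD 1 0
    · rw [if_pos hc]
      have hrec := ih (r.getD 1 0 + 1) htail
      refine ⟨by have := hrec.1; omega, ?_, ?_⟩
      · rintro ⟨r', hr', hcov⟩
        rcases List.mem_cons.mp hr' with h | h
        · subst h; have := hrec.1; omega
        · exact hrec.2.1 ⟨r', h, hcov⟩
      · intro x hx1 hx2
        rcases lt_or_ge x (r.getD 1 0 + 1) with hxe | hxe
        · exact ⟨r, by simp, by omega⟩
        · rcases hrec.2.2 x hxe hx2 with ⟨r', hr', hcov⟩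
          exact ⟨r', by simp [hr'], hcov⟩
    · rw [if_neg hc]
      rcases lt_or_ge b0 (r.getD 0 0) with hlow | hge
      · rw [sweepUp_id l b0 (fun r' hr' => by have := hhead r' hr'; omega)]
        refine ⟨le_refl _, ?_, fun x hx1 hx2 => absurd hx2 (by omega)⟩
        rintro ⟨r', hr', hcov⟩
        rcases List.mem_cons.mp hr' with h | h
        · subst h; omega
        · have := hhead r' h; omega
      · have hbe : r.getD 1 0 < b0 := by omega
        have hrec := ih b0 htail
        refine ⟨hrec.1, ?_, ?_⟩
        · rintro ⟨r', hr', hcov⟩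
          rcases List.mem_cons.mp hr' with h | h
          · subst h; have := hrec.1; omega
          · exact hrec.2.1 ⟨r', h, hcov⟩
        · intro x hx1 hx2
          rcases hrec.2.2 x hx1 hx2 with ⟨r', hr', hcov⟩
          exact ⟨r', by simp [hr'], hcov⟩

theorem sweepDown_spec (l : List (List Int)) (t0 : Int)
    (hp : l.Pairwise (fun r r' => r'.getD 1 0 ≤ r.getD 1 0)) :
    MaxEsc (covL l) t0 (sweepDown l t0) := by
  induction l generalizing t0 with
  | nil =>
    rw [sweepDown_nil]
    exact ⟨le_refl _, by rintro ⟨r, hr, _⟩; simp at hr, fun x hx1 hx2 => absurd hx2 (by omega)⟩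
  | cons r l ih =>
    rcases List.pairwise_cons.mp hp with ⟨hhead, htail⟩
    rw [sweepDown_cons]
    by_cases hc : r.getD 0 0 ≤ t0 ∧ t0 ≤ r.getD 1 0
    · rw [if_pos hc]
      have hrec := ih (r.getD 0 0 - 1) htail
      refine ⟨by have := hrec.1; omega, ?_, ?_⟩
      · rintro ⟨r', hr', hcov⟩
        rcases List.mem_cons.mp hr' with h | h
        · subst h; have := hrec.1; omega
        · exact hrec.2.1 ⟨r', h, hcov⟩
      · intro x hx1 hx2
        rcases lt_or_ge (r.getD 0 0 - 1) x with hxs | hxs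
        · exact ⟨r, by simp, by omega⟩
        · rcases hrec.2.2 x hxs hx2 with ⟨r', hr', hcov⟩
          exact ⟨r', by simp [hr'], hcov⟩
    · rw [if_neg hc]
      rcases lt_or_ge (r.getD 1 0) t0 with hhigh | hle
      · rw [sweepDown_id l t0 (fun r' hr' => by have := hhead r' hr'; omega)]
        refine ⟨le_refl _, ?_, fun x hx1 hx2 => absurd hx2 (by omega)⟩
        rintro ⟨r', hr', hcov⟩
        rcases List.mem_cons.mp hr' with h | h
        · subst h; omega
        · have := hhead r' h; omega
      · have hts : t0 < r.getD 0 0 := by omega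
        have hrec := ih t0 htail
        refine ⟨hrec.1, ?_, ?_⟩
        · rintro ⟨r', hr', hcov⟩
          rcases List.mem_cons.mp hr' with h | h
          · subst h; have := hrec.1; omega
          · exact hrec.2.1 ⟨r', h, hcov⟩
        · intro x hx1 hx2
          rcases hrec.2.2 x hx1 hx2 with ⟨r', hr', hcov⟩
          exact ⟨r', by simp [hr'], hcov⟩

-- coverage of the i-th-removed list = coverage over indices ≠ i
theorem covL_take_drop (rs : List (List Int)) (i : Nat) (hi : i < rs.length) (x : Int) :
    covL (rs.take i ++ rs.drop (i+1)) x ↔ covIdx rs i x := by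
  constructor
  · rintro ⟨r, hr, hcov⟩
    rcases List.mem_append.mp hr with h | h
    · rcases List.mem_iff_getElem.mp h with ⟨n, hn, heq⟩
      have hn' : n < i := by simp [List.length_take] at hn; omega
      rw [List.getElem_take] at heq
      refine ⟨n, by omega, by omega, ?_⟩
      unfold covK pvS pvE
      rw [List.getD_eq_getElem rs [] (by omega), heq]
      exact hcov
    · rcases List.mem_iff_getElem.mp h with ⟨n, hn, heq⟩
      have hn2 : i + 1 + n < rs.length := by simp [List.length_drop] at hn; omega
      rw [List.getElem_drop] at heq
      refine ⟨i + 1 + n, hn2, by omega, ?_⟩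
      unfold covK pvS pvE
      rw [List.getD_eq_getElem rs [] hn2, heq]
      exact hcov
  · rintro ⟨k, hk, hki, hcov⟩
    unfold covK pvS pvE at hcov
    rw [List.getD_eq_getElem rs [] hk] at hcov
    rcases Nat.lt_or_ge k i with hlt | hge
    · refine ⟨rs[k], List.mem_append.mpr (Or.inl (List.mem_iff_getElem.mpr
        ⟨k, by simp [List.length_take]; omega, List.getElem_take⟩)), hcov⟩
    · refine ⟨rs[k], List.mem_append.mpr (Or.inr (List.mem_iff_getElem.mpr
        ⟨k - (i+1), by simp [List.length_drop]; omega, ?_⟩)), hcov⟩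
      rw [List.getElem_drop]
      have hidx : i + 1 + (k - (i+1)) = k := by omega
      simp [hidx]

theorem covL_perm {l l' : List (List Int)} (h : l.Perm l') (x : Int) :
    covL l x ↔ covL l' x := by
  unfold covL
  constructor <;> rintro ⟨r, hr, hcov⟩
  · exact ⟨r, h.mem_iff.mp hr, hcov⟩
  · exact ⟨r, h.mem_iff.mpr hr, hcov⟩

-- the two outer loops keep identical states
theorem outer_eq (rs : List (List Int)) (i L : Nat) :
    rs.length = L → outerA rs i L = outerB rs i L := by
  induction rs, i using outerA.induct L with
  | case1 rs i h bt IH =>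
    intro hlen
    rw [outerA, outerB, dif_pos h, dif_pos h]
    have hi : i < rs.length := by omega
    have hA := escA_spec rs i (pvS rs i) (pvE rs i) 0 (pvS rs i) (pvE rs i)
      (le_refl _) (le_refl _)
      (fun x hx1 hx2 => absurd hx2 (by omega))
      (fun x hx1 hx2 => absurd hx2 (by omega))
      (fun k hk => absurd hk (by omega))
    have hsortU := PySem.List.sorted_perm (xs := rs.take i ++ rs.drop (i+1))
      (key := fun r => r.getD 0 0) (rev := false)
    have hsortD := PySem.List.sorted_perm (xs := rs.take i ++ rs.drop (i+1))
      (key := fun r => r.getD 1 0) (rev := true)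
    have hcovU : ∀ x, covL (PySem.List.sorted (rs.take i ++ rs.drop (i+1)) (fun r => r.getD 0 0) false) x
        ↔ covIdx rs i x := fun x => (covL_perm hsortU x).trans (covL_take_drop rs i hi x)
    have hcovD : ∀ x, covL (PySem.List.sorted (rs.take i ++ rs.drop (i+1)) (fun r => r.getD 1 0) true) x
        ↔ covIdx rs i x := fun x => (covL_perm hsortD x).trans (covL_take_drop rs i hi x)
    have hBu : MinEsc (covIdx rs i) (pvS rs i)
        (sweepUp (PySem.List.sorted (rs.take i ++ rs.drop (i+1)) (fun r => r.getD 0 0) false) (pvS rs i)) :=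
      MinEsc_congr hcovU (sweepUp_spec _ _ (PySem.List.sorted_pairwise _ _))
    have hBd : MaxEsc (covIdx rs i) (pvE rs i)
        (sweepDown (PySem.List.sorted (rs.take i ++ rs.drop (i+1)) (fun r => r.getD 1 0) true) (pvE rs i)) :=
      MaxEsc_congr hcovD (sweepDown_spec _ _ (PySem.List.sorted_pairwise_rev _ _))
    have heq1 := MinEsc_unique hA.1 hBu
    have heq2 := MaxEsc_unique hA.2 hBd
    show outerA (rs.set i [(escA rs i (pvS rs i) (pvE rs i) 0).1,
                           (escA rs i (pvS rs i) (pvE rs i) 0).2]) (i+1) L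
       = outerB (rs.set i
           [sweepUp (PySem.List.sorted (rs.take i ++ rs.drop (i+1)) (fun r => r.getD 0 0) false) (pvS rs i),
            sweepDown (PySem.List.sorted (rs.take i ++ rs.drop (i+1)) (fun r => r.getD 1 0) true) (pvE rs i)]) (i+1) L
    rw [← heq1, ← heq2]
    exact IH (by simp [hlen])
  | case2 rs i h =>
    intro hlen
    rw [outerA, outerB, dif_neg h, dif_neg h]

-- pointwise equality of the two final sums
theorem sum_eq_aux (rs : List (List Int)) :
    ∀ acc : Int, rs.foldl (fun acc r =>
      if r.getD 1 0 - r.getD 0 0 + 1 > 0 then acc + (r.getD 1 0 - r.getD 0 0 + 1) else acc) acc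
    = rs.foldl (fun acc r => acc + max (r.getD 1 0 - r.getD 0 0 + 1) 0) acc := by
  induction rs with
  | nil => intro acc; rfl
  | cons r l ih =>
    intro acc
    simp only [List.foldl_cons]
    rw [ih]
    congr 1
    split_ifs <;> omega

theorem sum_eq (rs : List (List Int)) :
    sumA rs = rs.foldl (fun acc r => acc + max (r.getD 1 0 - r.getD 0 0 + 1) 0) 0 := by
  unfold sumA; exact sum_eq_aux rs 0

-- ===== VERDICT (by name: the statement is the Claim_ definition above) =====
theorem Part2_spec : Claim_equal_Part2 := by
  intro ranges _ _
  unfold Spec_Part2 Part2 Part2_alt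
  rw [outer_eq ranges 0 ranges.length rfl, sum_eq]
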